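-- pv_equiv track=rewrite | github.com/fy538/Episteme | backend/apps/agents/critique_agent.py | _extract_critique_structure
-- ===== SOURCE A (Python) =====
-- def _extract_critique_structure(content: str) -> dict:
--     """Extract assumptions, gaps, issues from critique markdown"""
--
--     structure = {
--         "unexamined_assumptions": [],
--         "evidence_gaps": [],
--         "logical_issues": [],
--         "missing_considerations": [],
--         "recommendations": []
--     }
--
--     # Parse sections
--     lines = content.split('\n')
--     current_section = None
--
--     for line in lines:
--         line_stripped = line.strip()
--
--         # Detect sections
--         if '## Unexamined Assumptions' in line or '### Unexamined Assumptions' in line: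
--             current_section = 'unexamined_assumptions'
--         elif '## Evidence Gaps' in line or '### Evidence Gaps' in line:
--             current_section = 'evidence_gaps'
--         elif '## Logical Issues' in line or '### Logical Issues' in line:
--             current_section = 'logical_issues'
--         elif '## Missing Considerations' in line or '### Missing Considerations' in line:
--             current_section = 'missing_considerations'
--         elif '## Recommendations' in line or '### Recommendations' in line:
--             current_section = 'recommendations'
--         # Extract list items
--         elif current_section and line_stripped.startswith(('1.', '2.', '3.', '4.', '5.', '-', '•', '*')):
--             item = line_stripped.lstrip('123456789.-•*').strip()
--             if item and current_section in structure:
--                 # Try to parse assumption/gap/issue structure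
--                 if ':' in item:
--                     parts = item.split(':', 1)
--                     structure[current_section].append({
--                         'title': parts[0].strip(),
--                         'description': parts[1].strip(),
--                         'severity': 'medium'  # Default
--                     })
--                 else:
--                     structure[current_section].append({
--                         'title': item,
--                         'description': '',
--                         'severity': 'medium'
--                     })
--
--     return structure
-- ===== SOURCE B (Python) =====
-- _SECTION_KEYS = ("unexamined_assumptions", "evidence_gaps", "logical_issues",
--                  "missing_considerations", "recommendations")
--
-- _HEADERS = [("## Unexamined Assumptions", "unexamined_assumptions"),
--             ("## Evidence Gaps", "evidence_gaps"),
--             ("## Logical Issues", "logical_issues"),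
--             ("## Missing Considerations", "missing_considerations"),
--             ("## Recommendations", "recommendations")]
--
--
-- def _header_key(line):
--     # '### Title' contains '## Title' as a substring, so one test covers both forms
--     for marker, key in _HEADERS:
--         if marker in line:
--             return key
--     return None
--
--
-- def _parse_item(line):
--     s = line.strip()
--     if not s.startswith(('1.', '2.', '3.', '4.', '5.', '-', '\u2022', '*')):
--         return None
--     item = s.lstrip('123456789.-\u2022*').strip()
--     if not item:
--         return None
--     if ':' in item:
--         title, desc = item.split(':', 1)
--         return {'title': title.strip(), 'description': desc.strip(), 'severity': 'medium'}
--     return {'title': item, 'description': '', 'severity': 'medium'}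
--
--
-- def _extract_critique_structure(content: str) -> dict:
--     # Phase 1: cut the text into (section_key, body_lines) segments.
--     segments = []
--     key, body = None, []
--     for line in content.split('\n'):
--         k = _header_key(line)
--         if k is not None:
--             if key is not None:
--                 segments.append((key, body))
--             key, body = k, []
--         else:
--             body.append(line)
--     if key is not None:
--         segments.append((key, body))
--     # Phase 2: parse each segment's body lines and group them per section key.
--     return {key: [it for k, b in segments if k == key
--                   for it in map(_parse_item, b) if it is not None]
--             for key in _SECTION_KEYS}
-- ===== Notes on version B (the rewrite author's own statement) =====
-- stated objective: alternative
-- what changed: A's single fused state-machine pass that mutates a dict keyed by the current section is replaced by a two-phase decomposition: phase 1 cuts the lines into ordered (section_key, body_lines) segments, phase 2 parses each segment's body and groups the parsed items per section key.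
import Mathlib
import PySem

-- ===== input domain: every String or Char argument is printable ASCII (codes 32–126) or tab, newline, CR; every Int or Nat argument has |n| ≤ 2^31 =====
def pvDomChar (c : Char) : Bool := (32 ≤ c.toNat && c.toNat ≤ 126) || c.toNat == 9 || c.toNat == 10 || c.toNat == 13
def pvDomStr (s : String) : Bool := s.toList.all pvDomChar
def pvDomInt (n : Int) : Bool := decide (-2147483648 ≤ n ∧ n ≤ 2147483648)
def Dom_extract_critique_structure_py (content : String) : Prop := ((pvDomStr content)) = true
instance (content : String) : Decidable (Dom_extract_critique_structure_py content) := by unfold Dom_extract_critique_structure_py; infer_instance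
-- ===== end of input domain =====

-- B replaces A's fused dict-mutating state machine by a two-phase decomposition (segment the lines
-- under their headers, then parse each segment's body per section key); objective: alternative.

-- shared primitive helper: Python's s.lstrip('123456789.-•*') — drop leading chars from that set (exact hand port)
def pvLstripMarkers : List Char → List Char
  | [] => []
  | c :: cs => if c ∈ ['1','2','3','4','5','6','7','8','9','.','-','•','*'] then pvLstripMarkers cs else c :: cs

-- shared primitive helper: Python's s.startswith(('1.','2.','3.','4.','5.','-','•','*'))
def pvMarkersTest (s : String) : Bool :=
  PySem.Str.startswith s "1." || PySem.Str.startswith s "2." || PySem.Str.startswith s "3." ||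
  PySem.Str.startswith s "4." || PySem.Str.startswith s "5." || PySem.Str.startswith s "-" ||
  PySem.Str.startswith s "•" || PySem.Str.startswith s "*"

-- ===== PORT A =====
def extract_critique_structure_py (content : String) : List (String × List (List (String × String))) :=
  let structure0 : PySem.Dict String (List (List (String × String))) := PySem.Dict.ofList
    [("unexamined_assumptions", []), ("evidence_gaps", []), ("logical_issues", []),
     ("missing_considerations", []), ("recommendations", [])]
  let lines := (PySem.Str.split? content "\n").getD []
  let res := lines.foldl (fun (st : PySem.Dict String (List (List (String × String))) × Option String) line =>
      let line_stripped := PySem.Str.strip line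
      if PySem.Str.isIn "## Unexamined Assumptions" line || PySem.Str.isIn "### Unexamined Assumptions" line then
        (st.1, some "unexamined_assumptions")
      else if PySem.Str.isIn "## Evidence Gaps" line || PySem.Str.isIn "### Evidence Gaps" line then
        (st.1, some "evidence_gaps")
      else if PySem.Str.isIn "## Logical Issues" line || PySem.Str.isIn "### Logical Issues" line then
        (st.1, some "logical_issues")
      else if PySem.Str.isIn "## Missing Considerations" line || PySem.Str.isIn "### Missing Considerations" line then
        (st.1, some "missing_considerations")
      else if PySem.Str.isIn "## Recommendations" line || PySem.Str.isIn "### Recommendations" line then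
        (st.1, some "recommendations")
      else
        match st.2 with
        | some cur =>
          if pvMarkersTest line_stripped then
            let item := PySem.Str.strip (String.ofList (pvLstripMarkers line_stripped.toList))
            if (item != "") && st.1.contains cur then
              if PySem.Str.isIn ":" item then
                let parts := (PySem.Str.splitMax? item ":" 1).getD []
                (st.1.modify cur [] (· ++ [[("title", PySem.Str.strip (PySem.List.pyGetD parts 0 "")),
                                           ("description", PySem.Str.strip (PySem.List.pyGetD parts 1 "")),
                                           ("severity", "medium")]]), st.2)
              else
                (st.1.modify cur [] (· ++ [[("title", item), ("description", ""), ("severity", "medium")]]), st.2)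
            else (st.1, st.2)
          else (st.1, st.2)
        | none => (st.1, st.2))
    (structure0, none)
  res.1.items

-- ===== PORT B =====
def pvHeaderKey (line : String) : Option String :=
  if PySem.Str.isIn "## Unexamined Assumptions" line then some "unexamined_assumptions"
  else if PySem.Str.isIn "## Evidence Gaps" line then some "evidence_gaps"
  else if PySem.Str.isIn "## Logical Issues" line then some "logical_issues"
  else if PySem.Str.isIn "## Missing Considerations" line then some "missing_considerations"
  else if PySem.Str.isIn "## Recommendations" line then some "recommendations"
  else none

def pvParseItem (line : String) : Option (List (String × String)) :=
  let s := PySem.Str.strip line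
  if !pvMarkersTest s then none
  else
    let item := PySem.Str.strip (String.ofList (pvLstripMarkers s.toList))
    if item = "" then none
    else if PySem.Str.isIn ":" item then
      let parts := (PySem.Str.splitMax? item ":" 1).getD []
      some [("title", PySem.Str.strip (PySem.List.pyGetD parts 0 "")),
            ("description", PySem.Str.strip (PySem.List.pyGetD parts 1 "")),
            ("severity", "medium")]
    else some [("title", item), ("description", ""), ("severity", "medium")]

def pvSectionKeys : List String :=
  ["unexamined_assumptions", "evidence_gaps", "logical_issues", "missing_considerations", "recommendations"]

def extract_critique_structure_py_alt (content : String) : List (String × List (List (String × String))) :=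
  let st := ((PySem.Str.split? content "\n").getD []).foldl
    (fun (st : List (String × List String) × Option String × List String) line =>
      match pvHeaderKey line with
      | some k =>
        match st.2.1 with
        | some key0 => (st.1 ++ [(key0, st.2.2)], some k, ([] : List String))
        | none => (st.1, some k, ([] : List String))
      | none => (st.1, st.2.1, st.2.2 ++ [line]))
    ([], none, [])
  let segments := match st.2.1 with
    | some key0 => st.1 ++ [(key0, st.2.2)]
    | none => st.1
  pvSectionKeys.map (fun key =>
    (key, (segments.filter (fun seg => seg.1 == key)).flatMap (fun seg => seg.2.filterMap pvParseItem)))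

-- ===== PRECONDITION & SPEC =====
def Spec_extract_critique_structure_py (content : String) (out : List (String × List (List (String × String)))) : Prop := out = extract_critique_structure_py_alt content
instance (content : String) (out : List (String × List (List (String × String)))) : Decidable (Spec_extract_critique_structure_py content out) := by unfold Spec_extract_critique_structure_py; infer_instance

-- ===== CLAIM (what is proved, stated in full; the proofs are below) =====
def Claim_equal_extract_critique_structure_py : Prop := ∀ (content : String), Dom_extract_critique_structure_py content → Spec_extract_critique_structure_py content (extract_critique_structure_py content)


-- ===== LEMMAS AND PROOFS =====

-- proof-side abbreviations of the two loop bodies and the B-side finisher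
def pvStepA (st : PySem.Dict String (List (List (String × String))) × Option String) (line : String) :
    PySem.Dict String (List (List (String × String))) × Option String :=
  match pvHeaderKey line with
  | some k => (st.1, some k)
  | none =>
    match st.2 with
    | some cur =>
      match pvParseItem line with
      | some it => if st.1.contains cur then (st.1.modify cur [] (· ++ [it]), st.2) else (st.1, st.2)
      | none => (st.1, st.2)
    | none => (st.1, st.2)

def pvStepB (st : List (String × List String) × Option String × List String) (line : String) :
    List (String × List String) × Option String × List String :=
  match pvHeaderKey line with
  | some k =>
    match st.2.1 with
    | some key0 => (st.1 ++ [(key0, st.2.2)], some k, ([] : List String))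
    | none => (st.1, some k, ([] : List String))
  | none => (st.1, st.2.1, st.2.2 ++ [line])

def pvFlush (st : List (String × List String) × Option String × List String) : List (String × List String) :=
  match st.2.1 with
  | some key0 => st.1 ++ [(key0, st.2.2)]
  | none => st.1

def pvOut (segs : List (String × List String)) (k : String) : List (List (String × String)) :=
  (segs.filter (fun seg => seg.1 == k)).flatMap (fun seg => seg.2.filterMap pvParseItem)

-- the items contributed to key k by the remaining lines, given the current section
def pvD : Option String → List String → String → List (List (String × String))
  | _, [], _ => []
  | cur, l :: ls, k =>
    match pvHeaderKey l with
    | some k' => pvD (some k') ls k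
    | none =>
      (match cur with
       | some c => if c = k then (pvParseItem l).toList else []
       | none => []) ++ pvD cur ls k

-- same, for B's state (current section, pending body)
def pvE : Option String → List String → List String → String → List (List (String × String))
  | key, body, [], k =>
    match key with
    | some c => if c = k then body.filterMap pvParseItem else []
    | none => []
  | key, body, l :: ls, k =>
    match pvHeaderKey l with
    | some k' =>
      (match key with
       | some c => if c = k then body.filterMap pvParseItem else []
       | none => []) ++ pvE (some k') [] ls k
    | none => pvE key (body ++ [l]) ls k

lemma pv_or_absorb {a b : Bool} (h : b = true → a = true) : (a || b) = a := by
  cases a <;> cases b <;> simp_all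

lemma pv_isIn_absorb (a b line : String) (h : a.toList <:+: b.toList) :
    (PySem.Str.isIn a line || PySem.Str.isIn b line) = PySem.Str.isIn a line := by
  apply pv_or_absorb
  intro hb
  rw [PySem.Str.isIn_iff_infix] at hb ⊢
  exact h.trans hb

lemma pv_stepA_eq (st : PySem.Dict String (List (List (String × String))) × Option String) (line : String) :
    (let line_stripped := PySem.Str.strip line
     if PySem.Str.isIn "## Unexamined Assumptions" line || PySem.Str.isIn "### Unexamined Assumptions" line then
        (st.1, some "unexamined_assumptions")
      else if PySem.Str.isIn "## Evidence Gaps" line || PySem.Str.isIn "### Evidence Gaps" line then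
        (st.1, some "evidence_gaps")
      else if PySem.Str.isIn "## Logical Issues" line || PySem.Str.isIn "### Logical Issues" line then
        (st.1, some "logical_issues")
      else if PySem.Str.isIn "## Missing Considerations" line || PySem.Str.isIn "### Missing Considerations" line then
        (st.1, some "missing_considerations")
      else if PySem.Str.isIn "## Recommendations" line || PySem.Str.isIn "### Recommendations" line then
        (st.1, some "recommendations")
      else
        match st.2 with
        | some cur =>
          if pvMarkersTest line_stripped then
            let item := PySem.Str.strip (String.ofList (pvLstripMarkers line_stripped.toList))
            if (item != "") && st.1.contains cur then
              if PySem.Str.isIn ":" item then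
                let parts := (PySem.Str.splitMax? item ":" 1).getD []
                (st.1.modify cur [] (· ++ [[("title", PySem.Str.strip (PySem.List.pyGetD parts 0 "")),
                                           ("description", PySem.Str.strip (PySem.List.pyGetD parts 1 "")),
                                           ("severity", "medium")]]), st.2)
              else
                (st.1.modify cur [] (· ++ [[("title", item), ("description", ""), ("severity", "medium")]]), st.2)
            else (st.1, st.2)
          else (st.1, st.2)
        | none => (st.1, st.2)) = pvStepA st line := by
  rw [pv_isIn_absorb "## Unexamined Assumptions" "### Unexamined Assumptions" line (by decide),
      pv_isIn_absorb "## Evidence Gaps" "### Evidence Gaps" line (by decide),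
      pv_isIn_absorb "## Logical Issues" "### Logical Issues" line (by decide),
      pv_isIn_absorb "## Missing Considerations" "### Missing Considerations" line (by decide),
      pv_isIn_absorb "## Recommendations" "### Recommendations" line (by decide)]
  unfold pvStepA pvHeaderKey
  by_cases h1 : PySem.Str.isIn "## Unexamined Assumptions" line = true
  · rw [if_pos h1, if_pos h1]
  rw [if_neg h1, if_neg h1]
  by_cases h2 : PySem.Str.isIn "## Evidence Gaps" line = true
  · rw [if_pos h2, if_pos h2]
  rw [if_neg h2, if_neg h2]
  by_cases h3 : PySem.Str.isIn "## Logical Issues" line = true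
  · rw [if_pos h3, if_pos h3]
  rw [if_neg h3, if_neg h3]
  by_cases h4 : PySem.Str.isIn "## Missing Considerations" line = true
  · rw [if_pos h4, if_pos h4]
  rw [if_neg h4, if_neg h4]
  by_cases h5 : PySem.Str.isIn "## Recommendations" line = true
  · rw [if_pos h5, if_pos h5]
  rw [if_neg h5, if_neg h5]
  cases hst : st.2 with
  | none => rfl
  | some cur =>
    dsimp only []
    unfold pvParseItem
    simp only [PySem.Str.toList_strip]
    by_cases hm : pvMarkersTest (PySem.Str.strip line) = true
    · rw [if_pos hm]
      have hmB : (!pvMarkersTest (PySem.Str.strip line)) = false := by rw [hm]; rfl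
      rw [if_neg (by simp [hmB] : ¬(!pvMarkersTest (PySem.Str.strip line)) = true)]
      by_cases hi : PySem.Str.strip (String.ofList (pvLstripMarkers (PySem.Chars.strip line.toList))) = ""
      · rw [if_pos hi]
        have : (PySem.Str.strip (String.ofList (pvLstripMarkers (PySem.Chars.strip line.toList))) != "") = false := by
          simp [hi]
        rw [this]
        rfl
      · rw [if_neg hi]
        have hne : (PySem.Str.strip (String.ofList (pvLstripMarkers (PySem.Chars.strip line.toList))) != "") = true := by
          simp [hi]
        rw [hne]
        by_cases hc : st.1.contains cur = true
        · rw [hc]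
          by_cases hin : PySem.Str.isIn ":" (PySem.Str.strip (String.ofList (pvLstripMarkers (PySem.Chars.strip line.toList)))) = true
          · rw [if_pos hin, if_pos hin]
            rw [Bool.true_and, if_pos rfl]
            rfl
          · rw [if_neg hin, if_neg hin]
            rw [Bool.true_and, if_pos rfl]
            rfl
        · have hcf : st.1.contains cur = false := by simp [hc]
          rw [hcf, Bool.true_and, if_neg (by simp : ¬(false = true))]
          by_cases hin : PySem.Str.isIn ":" (PySem.Str.strip (String.ofList (pvLstripMarkers (PySem.Chars.strip line.toList)))) = true
          · rw [if_pos hin]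
            rfl
          · rw [if_neg hin]
            rfl
    · have hmf : pvMarkersTest (PySem.Str.strip line) = false := by simp [hm]
      rw [if_neg hm]
      rw [if_pos (by simp [hmf] : (!pvMarkersTest (PySem.Str.strip line)) = true)]

lemma pv_contains_shape (ks : List String) (g : String → List (List (String × String))) (c : String) :
    (PySem.Dict.mk (ks.map fun k => (k, g k))).contains c = decide (c ∈ ks) := by
  induction ks with
  | nil => simp [PySem.Dict.contains]
  | cons k t ih =>
    simp [PySem.Dict.contains] at ih ⊢
    by_cases hk : k = c
    · simp [hk]
    · simp [hk, Ne.symm hk, ih]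

lemma pv_get?_shape (ks : List String) (g : String → List (List (String × String))) (c : String) :
    (PySem.Dict.mk (ks.map fun k => (k, g k))).get? c = if c ∈ ks then some (g c) else none := by
  induction ks with
  | nil => simp [PySem.Dict.get?]
  | cons k t ih =>
    simp only [PySem.Dict.get?, List.map_cons, List.find?_cons] at ih ⊢
    by_cases hk : k = c
    · subst hk; simp
    · have hb : ((k, g k).1 == c) = false := by simp [hk]
      rw [hb]
      simp only [List.mem_cons]
      rw [ih]
      by_cases hc : c ∈ t <;> simp [hc, Ne.symm hk]

lemma pv_modify_shape (ks : List String) (g : String → List (List (String × String))) (c : String)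
    (it : List (String × String)) (hc : c ∈ ks) :
    (PySem.Dict.mk (ks.map fun k => (k, g k))).modify c [] (· ++ [it]) =
      PySem.Dict.mk (ks.map fun k => (k, if k = c then g c ++ [it] else g k)) := by
  have hcon : (PySem.Dict.mk (ks.map fun k => (k, g k))).contains c = true := by
    rw [pv_contains_shape]; simp [hc]
  have hg : (PySem.Dict.mk (ks.map fun k => (k, g k))).getD c [] = g c := by
    unfold PySem.Dict.getD
    rw [pv_get?_shape]; simp [hc]
  unfold PySem.Dict.modify
  rw [hg]
  have hitems := PySem.Dict.items_insert_of_contains (PySem.Dict.mk (ks.map fun k => (k, g k)))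
      (g c ++ [it]) hcon
  have heta : ∀ (d : PySem.Dict String (List (List (String × String)))), d = PySem.Dict.mk d.items := by
    intro d; rfl
  rw [heta ((PySem.Dict.mk (ks.map fun k => (k, g k))).insert c (g c ++ [it])), hitems]
  congr 1
  simp only [List.map_map]
  apply List.map_congr_left
  intro k _
  by_cases hk : k = c
  · subst hk; simp
  · simp [hk, Function.comp]

lemma pv_headerKey_mem {l k : String} (h : pvHeaderKey l = some k) : k ∈ pvSectionKeys := by
  unfold pvHeaderKey at h
  unfold pvSectionKeys
  split_ifs at h <;> simp_all

lemma pv_foldA_items (lines : List String) (g : String → List (List (String × String)))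
    (cur : Option String) (hcur : cur = none ∨ ∃ c ∈ pvSectionKeys, cur = some c) :
    (lines.foldl pvStepA (PySem.Dict.mk (pvSectionKeys.map fun k => (k, g k)), cur)).1.items
      = pvSectionKeys.map fun k => (k, g k ++ pvD cur lines k) := by
  induction lines generalizing g cur with
  | nil => simp [pvD]
  | cons l t ih =>
    simp only [List.foldl_cons]
    by_cases hh : ∃ k', pvHeaderKey l = some k'
    · obtain ⟨k', hk'⟩ := hh
      simp only [pvStepA, hk']
      rw [ih g (some k') (Or.inr ⟨k', pv_headerKey_mem hk', rfl⟩)]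
      simp [pvD, hk']
    · have hn : pvHeaderKey l = none := by
        cases h : pvHeaderKey l
        · rfl
        · exact absurd ⟨_, h⟩ hh
      cases cur with
      | none =>
        simp only [pvStepA, hn]
        rw [ih g none (Or.inl rfl)]
        simp [pvD, hn]
      | some c =>
        have hc : c ∈ pvSectionKeys := by
          rcases hcur with h | ⟨c', hc', he⟩
          · exact absurd h (by simp)
          · cases he; exact hc'
        cases hp : pvParseItem l with
        | none =>
          simp only [pvStepA, hn, hp]
          rw [ih g (some c) hcur]
          simp [pvD, hn, hp]
        | some it =>
          have hcon : (PySem.Dict.mk (pvSectionKeys.map fun k => (k, g k))).contains c = true := by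
            rw [pv_contains_shape]; simp [hc]
          simp only [pvStepA, hn, hp, hcon, if_pos]
          rw [pv_modify_shape pvSectionKeys g c it hc]
          rw [ih (fun k => if k = c then g c ++ [it] else g k) (some c) hcur]
          apply List.map_congr_left
          intro k _
          simp only [pvD, hn, hp]
          by_cases hk : k = c
          · simp [hk]
          · have hck : ¬c = k := fun h => hk h.symm
            simp [hk, hck]

lemma pv_out_append (xs ys : List (String × List String)) (k : String) :
    pvOut (xs ++ ys) k = pvOut xs k ++ pvOut ys k := by
  simp [pvOut, List.filter_append]

lemma pv_foldB_out (lines : List String) (segs : List (String × List String))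
    (key : Option String) (body : List String) (k : String) :
    pvOut (pvFlush (lines.foldl pvStepB (segs, key, body))) k = pvOut segs k ++ pvE key body lines k := by
  induction lines generalizing segs key body with
  | nil =>
    cases key with
    | none => simp [pvFlush, pvE]
    | some c =>
      simp only [List.foldl_nil, pvFlush, pvE]
      rw [pv_out_append]
      by_cases hck : c = k <;> simp [pvOut, hck]
  | cons l t ih =>
    simp only [List.foldl_cons]
    by_cases hh : ∃ k', pvHeaderKey l = some k'
    · obtain ⟨k', hk'⟩ := hh
      cases key with
      | none =>
        simp only [pvStepB, hk']
        rw [ih]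
        simp [pvE, hk']
      | some c =>
        simp only [pvStepB, hk']
        rw [ih, pv_out_append]
        simp only [pvE, hk']
        by_cases hck : c = k <;> simp [pvOut, hck]
    · have hn : pvHeaderKey l = none := by
        cases h : pvHeaderKey l
        · rfl
        · exact absurd ⟨_, h⟩ hh
      simp only [pvStepB, hn]
      rw [ih]
      simp [pvE, hn]

lemma pv_E_eq_D (ls : List String) (key : Option String) (body : List String) (k : String) :
    pvE key body ls k =
      (match key with
       | some c => if c = k then body.filterMap pvParseItem else []
       | none => []) ++ pvD key ls k := by
  induction ls generalizing key body with
  | nil => cases key <;> simp [pvE, pvD]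
  | cons l t ih =>
    by_cases hh : ∃ k', pvHeaderKey l = some k'
    · obtain ⟨k', hk'⟩ := hh
      simp only [pvE, pvD, hk']
      rw [ih]
      simp
    · have hn : pvHeaderKey l = none := by
        cases h : pvHeaderKey l
        · rfl
        · exact absurd ⟨_, h⟩ hh
      simp only [pvE, pvD, hn]
      rw [ih]
      cases key with
      | none => simp
      | some c =>
        by_cases hck : c = k
        · cases hp : pvParseItem l <;>
            simp [hck, List.filterMap_append, hp]
        · simp [hck]

-- ===== VERDICT (by name: the statement is the Claim_ definition above) =====
theorem extract_critique_structure_py_spec : Claim_equal_extract_critique_structure_py := by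
  intro content _
  unfold Spec_extract_critique_structure_py
  show (List.foldl
      (fun (st : PySem.Dict String (List (List (String × String))) × Option String) (line : String) =>
      let line_stripped := PySem.Str.strip line
      if PySem.Str.isIn "## Unexamined Assumptions" line || PySem.Str.isIn "### Unexamined Assumptions" line then
        (st.1, some "unexamined_assumptions")
      else if PySem.Str.isIn "## Evidence Gaps" line || PySem.Str.isIn "### Evidence Gaps" line then
        (st.1, some "evidence_gaps")
      else if PySem.Str.isIn "## Logical Issues" line || PySem.Str.isIn "### Logical Issues" line then
        (st.1, some "logical_issues")
      else if PySem.Str.isIn "## Missing Considerations" line || PySem.Str.isIn "### Missing Considerations" line then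
        (st.1, some "missing_considerations")
      else if PySem.Str.isIn "## Recommendations" line || PySem.Str.isIn "### Recommendations" line then
        (st.1, some "recommendations")
      else
        match st.2 with
        | some cur =>
          if pvMarkersTest line_stripped then
            let item := PySem.Str.strip (String.ofList (pvLstripMarkers line_stripped.toList))
            if (item != "") && st.1.contains cur then
              if PySem.Str.isIn ":" item then
                let parts := (PySem.Str.splitMax? item ":" 1).getD []
                (st.1.modify cur [] (· ++ [[("title", PySem.Str.strip (PySem.List.pyGetD parts 0 "")),
                                           ("description", PySem.Str.strip (PySem.List.pyGetD parts 1 "")),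
                                           ("severity", "medium")]]), st.2)
              else
                (st.1.modify cur [] (· ++ [[("title", item), ("description", ""), ("severity", "medium")]]), st.2)
            else (st.1, st.2)
          else (st.1, st.2)
        | none => (st.1, st.2))
      (PySem.Dict.mk (pvSectionKeys.map fun k => (k, (fun _ => ([] : List (List (String × String)))) k)), none)
      ((PySem.Str.split? content "\n").getD [])).1.items
    = pvSectionKeys.map (fun key =>
        (key, pvOut (pvFlush (List.foldl pvStepB ([], none, []) ((PySem.Str.split? content "\n").getD []))) key))
  have hfun : (fun (st : PySem.Dict String (List (List (String × String))) × Option String) (line : String) =>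
      let line_stripped := PySem.Str.strip line
      if PySem.Str.isIn "## Unexamined Assumptions" line || PySem.Str.isIn "### Unexamined Assumptions" line then
        (st.1, some "unexamined_assumptions")
      else if PySem.Str.isIn "## Evidence Gaps" line || PySem.Str.isIn "### Evidence Gaps" line then
        (st.1, some "evidence_gaps")
      else if PySem.Str.isIn "## Logical Issues" line || PySem.Str.isIn "### Logical Issues" line then
        (st.1, some "logical_issues")
      else if PySem.Str.isIn "## Missing Considerations" line || PySem.Str.isIn "### Missing Considerations" line then
        (st.1, some "missing_considerations")
      else if PySem.Str.isIn "## Recommendations" line || PySem.Str.isIn "### Recommendations" line then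
        (st.1, some "recommendations")
      else
        match st.2 with
        | some cur =>
          if pvMarkersTest line_stripped then
            let item := PySem.Str.strip (String.ofList (pvLstripMarkers line_stripped.toList))
            if (item != "") && st.1.contains cur then
              if PySem.Str.isIn ":" item then
                let parts := (PySem.Str.splitMax? item ":" 1).getD []
                (st.1.modify cur [] (· ++ [[("title", PySem.Str.strip (PySem.List.pyGetD parts 0 "")),
                                           ("description", PySem.Str.strip (PySem.List.pyGetD parts 1 "")),
                                           ("severity", "medium")]]), st.2)
              else
                (st.1.modify cur [] (· ++ [[("title", item), ("description", ""), ("severity", "medium")]]), st.2)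
            else (st.1, st.2)
          else (st.1, st.2)
        | none => (st.1, st.2)) = pvStepA := funext fun st => funext fun line => pv_stepA_eq st line
  rw [hfun, pv_foldA_items ((PySem.Str.split? content "\n").getD []) (fun _ => []) none (Or.inl rfl)]
  apply List.map_congr_left
  intro k _
  rw [pv_foldB_out, pv_E_eq_D]
  simp [pvOut]
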